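-- pv_equiv track=rewrite | github.com/cse001/pincer-search | readDatabase.py | getSupport
-- ===== SOURCE A (Python) =====
-- def getSupport(items,database):
--     support = []
--     if not items:
--         return support.copy()
--     for item in items:
--         support.append(0)
--     for data in database:
--         tempData = data.copy()
--         for i in range(len(items)):
--             flag = 0
--             for item in items[i]:
--                 if item not in tempData:
--                     flag =1
--             if flag == 0:
--                 support[i] = support[i]+1
--     # for i in range(len(items)):
--     #     if len(items[i])==0:
--     #         support[i]=0
--     return support.copy()
-- ===== SOURCE B (Python) =====
-- def getSupport(items, database):
--     if not items:
--         return []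
--     universe = set()
--     for itemset in items:
--         universe.update(itemset)
--     n = len(database)
--     index = {u: {i for i in range(n) if u in database[i]} for u in universe}
--     full = set(range(n))
--     support = []
--     for itemset in items:
--         s = full
--         for u in itemset:
--             s = s & index[u]
--         support.append(len(s))
--     return support
-- ===== Notes on version B (the rewrite author's own statement) =====
-- stated objective: faster
-- what changed: Replaces A's per-record flag scan over every itemset (re-testing membership with list 'in' each time) by an inverted index built once (item -> set of record indices), after which each itemset's support is the size of an intersection of index sets.
import Mathlib
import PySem

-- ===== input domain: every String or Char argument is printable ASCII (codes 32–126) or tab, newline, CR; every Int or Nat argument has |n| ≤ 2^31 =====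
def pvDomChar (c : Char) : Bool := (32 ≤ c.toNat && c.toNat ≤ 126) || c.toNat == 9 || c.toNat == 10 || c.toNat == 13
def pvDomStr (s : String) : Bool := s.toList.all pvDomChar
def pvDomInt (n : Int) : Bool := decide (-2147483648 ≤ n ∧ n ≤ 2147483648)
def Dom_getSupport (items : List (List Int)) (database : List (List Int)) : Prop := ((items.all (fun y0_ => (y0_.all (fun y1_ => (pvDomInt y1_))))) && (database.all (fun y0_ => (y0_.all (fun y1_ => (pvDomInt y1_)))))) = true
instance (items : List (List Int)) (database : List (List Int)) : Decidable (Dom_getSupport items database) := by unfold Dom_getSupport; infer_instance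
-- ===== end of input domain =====

-- B replaces A's per-record flag scans by an inverted index (item -> set of record
-- indices) built once, answering each itemset by intersecting index sets (objective: faster).

-- ===== PORT A =====
def getSupport (items : List (List Int)) (database : List (List Int)) : List Int :=
  let support : List Int := []
  if items = [] then support
  else
    let support := items.foldl (fun s _ => s ++ [(0 : Int)]) support
    let support := database.foldl (fun support data =>
      let tempData := data
      (PySem.List.pyRange 0 (PySem.List.len items) 1).foldl (fun support i =>
        let flag : Int := (PySem.List.pyGetD items i []).foldl
          (fun flag item => if tempData.contains item then flag else 1) 0
        if flag = 0 then
          PySem.List.pySetD support i (PySem.List.pyGetD support i 0 + 1)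
        else support) support) support
    support

-- ===== PORT B =====
def getSupport_alt (items : List (List Int)) (database : List (List Int)) : List Int :=
  if items = [] then []
  else
    let univ : PySem.Set Int :=
      items.foldl (fun s itemset => PySem.Set.update s itemset) PySem.Set.empty
    let n : Int := PySem.List.len database
    let index : PySem.Dict Int (PySem.Set Int) :=
      univ.foldl (fun d u => d.insert u (PySem.Set.ofList
        ((PySem.List.pyRange 0 n 1).filter
          (fun i => (PySem.List.pyGetD database i []).contains u)))) PySem.Dict.empty
    let full : PySem.Set Int := PySem.Set.ofList (PySem.List.pyRange 0 n 1)
    items.foldl (fun support itemset =>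
      let s := itemset.foldl (fun s u => PySem.Set.inter s (index.getD u PySem.Set.empty)) full
      support ++ [PySem.Set.len s]) []

-- ===== PRECONDITION & SPEC =====
def Spec_getSupport (items : List (List Int)) (database : List (List Int)) (out : List Int) : Prop := out = getSupport_alt items database
instance (items : List (List Int)) (database : List (List Int)) (out : List Int) : Decidable (Spec_getSupport items database out) := by unfold Spec_getSupport; infer_instance

-- ===== CLAIM (what is proved, stated in full; the proofs are below) =====
def Claim_equal_getSupport : Prop := ∀ (items : List (List Int)) (database : List (List Int)), Dom_getSupport items database → Spec_getSupport items database (getSupport items database)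

-- ===== LEMMAS AND PROOFS =====

-- the common characterisation: count of records containing every item of `it`
def pvCount (database : List (List Int)) (it : List Int) : Int :=
  (database.countP (fun data => it.all (fun u => data.contains u)) : Int)

-- generic: appending loop is a map
theorem foldl_append_singleton {α β : Type} (f : α → β) (l : List α) (acc : List β) :
    l.foldl (fun s x => s ++ [f x]) acc = acc ++ l.map f := by
  induction l generalizing acc with
  | nil => simp
  | cons x xs ih => simp [List.foldl_cons, ih, List.append_assoc]

-- A's flag loop
theorem flag_foldl (data : List Int) (L : List Int) (c : Int) :
    L.foldl (fun flag item => if data.contains item then flag else 1) c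
      = if L.all (fun u => data.contains u) then c else (1 : Int) := by
  induction L generalizing c with
  | nil => simp
  | cons x xs ih =>
    rw [List.foldl_cons, ih]
    by_cases h : x ∈ data <;> by_cases h2 : ∀ y ∈ xs, y ∈ data <;>
      simp [List.all_cons, h, h2]

-- A's inner index loop, over List.range, pointwise
theorem inner_range_foldl (p : Nat → Bool) (m : Nat) (s : List Int) (hm : m ≤ s.length) :
    (List.range m).foldl
        (fun s k => if p k then s.set k (s.getD k 0 + 1) else s) s
      = ((List.range m).map (fun k => s.getD k 0 + if p k then 1 else 0)) ++ s.drop m := by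
  induction m with
  | zero => simp
  | succ m ih =>
    have hm' : m ≤ s.length := Nat.le_of_succ_le hm
    have hlt : m < s.length := hm
    rw [List.range_succ, List.foldl_append, ih hm', List.map_append, List.foldl_cons,
      List.foldl_nil]
    have hdrop : s.drop m = s[m] :: s.drop (m + 1) := List.drop_eq_getElem_cons hlt
    have hlenmap : ((List.range m).map (fun k => s.getD k 0 + if p k then 1 else 0)).length = m := by
      simp
    have hgetD : s.getD m 0 = s[m] := List.getD_eq_getElem s 0 hlt
    by_cases hp : p m = true
    · simp only [hp, if_true]
      rw [hdrop]
      have hget2 : ((List.range m).map (fun k => s.getD k 0 + if p k then 1 else 0)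
          ++ s[m] :: s.drop (m + 1)).getD m 0 = s[m] := by
        simp [List.getD_eq_getElem?_getD, List.getElem?_append_right, hlenmap,
          List.getElem?_eq_getElem hlt]
      rw [hget2, List.set_append]
      simp [hlenmap, List.append_assoc]
      rw [hdrop]
      simp [List.getElem?_eq_getElem hlt, hp]
      rw [hdrop, List.set_cons_zero]
    · simp only [hp, if_false, Bool.false_eq_true]
      rw [hdrop]
      simp [List.getD_eq_getElem?_getD, List.getElem?_eq_getElem hlt, hgetD, hp,
        List.append_assoc]

-- the per-index predicate of record `data`
def pvHit (items : List (List Int)) (data : List Int) (k : Nat) : Bool :=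
  (items.getD k []).all (fun u => data.contains u)

theorem map_getD_range_self (s : List Int) :
    (List.range s.length).map (fun k => s.getD k 0) = s := by
  apply List.ext_getElem
  · simp
  · intro k h1 h2
    simp [List.getElem?_eq_getElem h2]

theorem map_range_getD {α β : Type} (l : List α) (d : α) (f : α → β) :
    (List.range l.length).map (fun k => f (l.getD k d)) = l.map f := by
  apply List.ext_getElem
  · simp
  · intro k h1 h2
    have hk : k < l.length := by simpa using h2
    simp [List.getElem?_eq_getElem hk]

-- one record of A's outer loop
theorem inner_step (items : List (List Int)) (data : List Int) (s : List Int)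
    (hs : s.length = items.length) :
    (PySem.List.pyRange 0 (PySem.List.len items) 1).foldl (fun support i =>
        let flag : Int := (PySem.List.pyGetD items i []).foldl
          (fun flag item => if data.contains item then flag else 1) 0
        if flag = 0 then
          PySem.List.pySetD support i (PySem.List.pyGetD support i 0 + 1)
        else support) s
    = (List.range items.length).map (fun k =>
        s.getD k 0 + if pvHit items data k then 1 else 0) := by
  have hr : PySem.List.pyRange 0 (PySem.List.len items) 1
      = (List.range items.length).map (fun (k : Nat) => (k : Int)) := by
    apply List.ext_getElem
    · simp [PySem.List.length_pyRange_one, PySem.List.len_eq]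
    · intro k h1 h2
      simp [PySem.List.getElem_pyRange_one, PySem.List.len_eq]
  rw [hr, List.foldl_map]
  have hstep : ∀ (sup : List Int) (k : Nat),
      (fun (support : List Int) (i : Int) =>
        let flag : Int := (PySem.List.pyGetD items i []).foldl
          (fun flag item => if data.contains item then flag else 1) 0
        if flag = 0 then
          PySem.List.pySetD support i (PySem.List.pyGetD support i 0 + 1)
        else support) sup (k : Int)
      = if pvHit items data k then sup.set k (sup.getD k 0 + 1) else sup := by
    intro sup k
    simp only [PySem.List.pyGetD_natCast, PySem.List.pySetD_natCast, flag_foldl]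
    by_cases hq : (items.getD k []).all (fun u => data.contains u) = true
    · simp [pvHit, hq]
    · simp [pvHit, hq]
  have : ((List.range items.length).foldl (fun sup k =>
      (fun (support : List Int) (i : Int) =>
        let flag : Int := (PySem.List.pyGetD items i []).foldl
          (fun flag item => if data.contains item then flag else 1) 0
        if flag = 0 then
          PySem.List.pySetD support i (PySem.List.pyGetD support i 0 + 1)
        else support) sup ((k : Nat) : Int)) s)
      = (List.range items.length).foldl (fun sup k =>
        if pvHit items data k then sup.set k (sup.getD k 0 + 1) else sup) s := by
    apply PySem.List.foldl_congr_mem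
    intro acc k _
    exact hstep acc k
  rw [this, inner_range_foldl (pvHit items data) items.length s (le_of_eq hs.symm)]
  have hd : List.drop items.length s = [] := by
    rw [← hs]; exact List.drop_length
  rw [hd, List.append_nil]

-- A's outer loop, pointwise
theorem outer_foldl (items : List (List Int)) (db : List (List Int)) (s : List Int)
    (hs : s.length = items.length) :
    db.foldl (fun support data =>
      (PySem.List.pyRange 0 (PySem.List.len items) 1).foldl (fun support i =>
        let flag : Int := (PySem.List.pyGetD items i []).foldl
          (fun flag item => if data.contains item then flag else 1) 0
        if flag = 0 then
          PySem.List.pySetD support i (PySem.List.pyGetD support i 0 + 1)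
        else support) support) s
    = (List.range items.length).map (fun k =>
        s.getD k 0 + (db.countP (fun data => pvHit items data k) : Int)) := by
  induction db generalizing s with
  | nil =>
    simp only [List.foldl_nil, List.countP_nil, Int.natCast_zero, add_zero]
    rw [← hs, map_getD_range_self]
  | cons data db ih =>
    rw [List.foldl_cons, inner_step items data s hs]
    rw [ih _ (by simp)]
    apply List.ext_getElem
    · simp
    · intro k h1 h2
      simp only [List.getElem_map, List.getElem_range]
      have hk : k < items.length := by simpa using h1
      have hget : ((List.range items.length).map (fun j =>
          s.getD j 0 + if pvHit items data j then 1 else 0)).getD k 0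
          = s.getD k 0 + if pvHit items data k then 1 else 0 := by
        rw [List.getD_eq_getElem _ 0 (by simpa using hk)]
        simp
      rw [hget, List.countP_cons]
      by_cases hq : pvHit items data k = true <;> simp [hq] <;> push_cast <;> ring

-- A's result characterised
theorem getSupport_eq_map (items database : List (List Int)) (h : items ≠ []) :
    getSupport items database = items.map (pvCount database) := by
  show (if items = [] then [] else _) = _
  rw [if_neg h]
  rw [foldl_append_singleton (fun _ => (0 : Int)) items []]
  rw [outer_foldl items database (([] : List Int) ++ items.map (fun _ => (0 : Int))) (by simp)]
  have hzero : ∀ k < items.length,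
      ((([] : List Int) ++ items.map (fun _ => (0 : Int)))).getD k 0 = 0 := by
    intro k hk
    rw [List.nil_append, List.getD_eq_getElem _ 0 (by simpa using hk)]
    simp
  calc (List.range items.length).map (fun k =>
        ((([] : List Int) ++ items.map (fun _ => (0 : Int)))).getD k 0
          + (database.countP (fun data => pvHit items data k) : Int))
      = (List.range items.length).map (fun k => pvCount database (items.getD k [])) := by
        apply List.ext_getElem
        · simp
        · intro k h1 h2
          have hk : k < items.length := by simpa using h1
          simp only [List.getElem_map, List.getElem_range]
          rw [hzero k hk]
          simp [pvCount, pvHit]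
    _ = items.map (pvCount database) := map_range_getD items [] (pvCount database)

-- generic: membership/nodup of the universe fold
theorem mem_foldl_update {ls : List (List Int)} {s : List Int} {u : Int} :
    u ∈ ls.foldl (fun s l => PySem.Set.update s l) s ↔ u ∈ s ∨ ∃ l ∈ ls, u ∈ l := by
  induction ls generalizing s with
  | nil => simp
  | cons l ls ih =>
    simp only [List.foldl_cons, ih, PySem.Set.mem_update, List.mem_cons]
    constructor
    · rintro ((h | h) | ⟨l', hl', hu⟩)
      · exact Or.inl h
      · exact Or.inr ⟨l, Or.inl rfl, h⟩
      · exact Or.inr ⟨l', Or.inr hl', hu⟩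
    · rintro (h | ⟨l', (rfl | hl'), hu⟩)
      · exact Or.inl (Or.inl h)
      · exact Or.inl (Or.inr hu)
      · exact Or.inr ⟨l', hl', hu⟩

theorem nodup_foldl_update {ls : List (List Int)} {s : List Int} (hs : s.Nodup) :
    (ls.foldl (fun s l => PySem.Set.update s l) s).Nodup := by
  induction ls generalizing s with
  | nil => exact hs
  | cons l ls ih => exact ih (PySem.Set.nodup_update s l hs)

-- dict-comprehension lookup
theorem getD_index {ks : List Int} (hk : ks.Nodup) (f : Int → PySem.Set Int)
    {u : Int} (hu : u ∈ ks) :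
    (ks.foldl (fun d k => d.insert k (f k)) PySem.Dict.empty).getD u PySem.Set.empty = f u := by
  have hitems : (ks.foldl (fun d k => d.insert k (f k)) PySem.Dict.empty).items
      = PySem.Dict.empty.items ++ ks.map (fun k => (k, f k)) := by
    exact PySem.Dict.items_foldl_insert_fresh ks (fun k => k) f PySem.Dict.empty
      (fun a _ => PySem.Dict.contains_empty a) (by simpa using hk)
  apply PySem.Dict.getD_of_mem_items
  · rw [hitems]
    exact List.mem_append_right _ (List.mem_map.mpr ⟨u, hu, rfl⟩)
  · show ((ks.foldl (fun d k => d.insert k (f k)) PySem.Dict.empty).items.map (·.1)).Nodup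
    rw [hitems]
    simp only [List.map_append, List.map_map]
    have : ((fun p => (p : Int × PySem.Set Int).1) ∘ fun k => (k, f k)) = fun k => k := rfl
    rw [this]
    simpa [PySem.Dict.empty] using hk

-- intersection loop = one filter
theorem foldl_inter_filter (c : Int → Int → Bool) (r : List Int) (L : List Int)
    (s : List Int) (hs : ∀ i ∈ s, i ∈ r) :
    L.foldl (fun s u => s.filter (fun i => (r.filter (c u)).contains i)) s
      = s.filter (fun i => L.all (fun u => c u i)) := by
  induction L generalizing s with
  | nil => simp
  | cons u L ih =>
    rw [List.foldl_cons]
    have h1 : s.filter (fun i => (r.filter (c u)).contains i) = s.filter (c u) := by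
      apply List.filter_congr
      intro i hi
      simp [List.mem_filter, hs i hi]
    rw [h1, ih _ (fun i hi => hs i (List.mem_of_mem_filter hi))]
    rw [List.filter_filter]
    apply List.filter_congr
    intro i _
    simp [List.all_cons, Bool.and_comm]

-- filtered range length = countP
theorem length_filter_range (P : List Int → Bool) (db : List (List Int)) :
    ((List.range db.length).filter (fun k => P (db.getD k []))).length = db.countP P := by
  induction db using List.reverseRecOn with
  | nil => simp
  | append_singleton db d ih =>
    rw [List.length_append, List.length_singleton, List.range_succ, List.filter_append,
      List.length_append, List.countP_append]
    have h1 : (List.range db.length).filter (fun k => P ((db ++ [d]).getD k []))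
        = (List.range db.length).filter (fun k => P (db.getD k [])) := by
      apply List.filter_congr
      intro k hk
      rw [List.mem_range] at hk
      simp [List.getD_eq_getElem?_getD, List.getElem?_append_left hk]
    rw [h1, ih]
    simp [List.getD_eq_getElem?_getD, List.getElem?_append_right (Nat.le_refl db.length),
      List.countP_cons, List.filter]
    by_cases hP : P d = true <;> simp [hP]

-- B's result characterised
theorem getSupport_alt_eq_map (items database : List (List Int)) (h : items ≠ []) :
    getSupport_alt items database = items.map (pvCount database) := by
  have hbody : getSupport_alt items database
      = items.foldl (fun support itemset =>
          support ++ [PySem.Set.len (itemset.foldl (fun s u => PySem.Set.inter s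
            (((items.foldl (fun s itemset => PySem.Set.update s itemset) PySem.Set.empty).foldl
              (fun d u => d.insert u (PySem.Set.ofList
                ((PySem.List.pyRange 0 (PySem.List.len database) 1).filter
                  (fun i => (PySem.List.pyGetD database i []).contains u)))) PySem.Dict.empty).getD
               u PySem.Set.empty))
            (PySem.Set.ofList (PySem.List.pyRange 0 (PySem.List.len database) 1)))]) [] := by
    show (if items = [] then [] else _) = _
    rw [if_neg h]
  rw [hbody, foldl_append_singleton, List.nil_append]
  apply List.map_congr_left
  intro it hit
  -- notation
  have huniv_nodup : (items.foldl (fun s itemset => PySem.Set.update s itemset)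
      PySem.Set.empty).Nodup := nodup_foldl_update List.nodup_nil
  have hr_nodup : (PySem.List.pyRange 0 (PySem.List.len database) 1).Nodup :=
    PySem.List.nodup_pyRange_one 0 (PySem.List.len database)
  have hfull : PySem.Set.ofList (PySem.List.pyRange 0 (PySem.List.len database) 1)
      = PySem.List.pyRange 0 (PySem.List.len database) 1 :=
    PySem.Set.ofList_eq_self_of_nodup _ hr_nodup
  have hstep : ∀ (s : List Int), ∀ u ∈ it,
      PySem.Set.inter s
        (((items.foldl (fun s itemset => PySem.Set.update s itemset) PySem.Set.empty).foldl
          (fun d u => d.insert u (PySem.Set.ofList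
            ((PySem.List.pyRange 0 (PySem.List.len database) 1).filter
              (fun i => (PySem.List.pyGetD database i []).contains u)))) PySem.Dict.empty).getD
           u PySem.Set.empty)
      = s.filter (fun i => ((PySem.List.pyRange 0 (PySem.List.len database) 1).filter
          (fun i => (PySem.List.pyGetD database i []).contains u)).contains i) := by
    intro s u hu
    have humem : u ∈ items.foldl (fun s itemset => PySem.Set.update s itemset)
        PySem.Set.empty :=
      mem_foldl_update.mpr (Or.inr ⟨it, hit, hu⟩)
    rw [getD_index huniv_nodup
      (fun u => PySem.Set.ofList ((PySem.List.pyRange 0 (PySem.List.len database) 1).filter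
        (fun i => (PySem.List.pyGetD database i []).contains u))) humem]
    rw [PySem.Set.ofList_eq_self_of_nodup _ (List.Nodup.filter _ hr_nodup)]
    rfl
  rw [hfull]
  rw [PySem.List.foldl_congr_mem it _
    (fun s u => s.filter (fun i => ((PySem.List.pyRange 0 (PySem.List.len database) 1).filter
      (fun i => (PySem.List.pyGetD database i []).contains u)).contains i)) _
    (fun acc x hx => hstep acc x hx)]
  rw [foldl_inter_filter (fun u i => (PySem.List.pyGetD database i []).contains u)
    (PySem.List.pyRange 0 (PySem.List.len database) 1) it
    (PySem.List.pyRange 0 (PySem.List.len database) 1) (fun i hi => hi)]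
  -- lengths
  have hr_map : PySem.List.pyRange 0 (PySem.List.len database) 1
      = (List.range database.length).map (fun (k : Nat) => (k : Int)) := by
    apply List.ext_getElem
    · simp [PySem.List.length_pyRange_one, PySem.List.len_eq]
    · intro k h1 h2
      simp [PySem.List.getElem_pyRange_one, PySem.List.len_eq]
  show (((PySem.List.pyRange 0 (PySem.List.len database) 1).filter
      (fun i => it.all (fun u => (PySem.List.pyGetD database i []).contains u))).length : Int)
    = pvCount database it
  rw [hr_map, ← List.countP_eq_length_filter, List.countP_map]
  have hcomp : ((fun i => it.all (fun u => (PySem.List.pyGetD database i []).contains u))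
        ∘ (fun (k : Nat) => (k : Int)))
      = fun (k : Nat) => it.all (fun u => (database.getD k []).contains u) := by
    funext k
    simp [Function.comp, PySem.List.pyGetD_natCast]
  rw [hcomp]
  rw [List.countP_eq_length_filter,
    length_filter_range (fun data => it.all (fun u => data.contains u)) database]
  rfl

-- ===== VERDICT (by name: the statement is the Claim_ definition above) =====
theorem getSupport_spec : Claim_equal_getSupport := by
  intro items database _
  unfold Spec_getSupport
  by_cases h : items = []
  · subst h; rfl
  · rw [getSupport_eq_map items database h, getSupport_alt_eq_map items database h]
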